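-- pv_equiv track=rewrite | github.com/dbenshachar/coding-problems | practice/street_illumination.py | street_illumination
-- ===== SOURCE A (Python) =====
-- from typing import List
-- from collections import defaultdict
--
-- def street_illumination(lamps : List[List[int]]) -> int:
--     starts = defaultdict(int)
--     ends = defaultdict(int)
--     points = set()
--     for pos, rad in lamps:
--         starts[pos - rad] += 1
--         ends[pos + rad] += 1
--         points.add(pos - rad)
--         points.add(pos + rad)
--     points = sorted(points)
--
--     illuminated = 0
--     best = 0
--     res = 0
--     for p in points:
--         illuminated += starts[p]
--         if illuminated > best:
--             best = illuminated
--             res = p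
--         illuminated -= ends[p]
--     return res
-- ===== SOURCE B (Python) =====
-- from typing import List
--
-- def street_illumination(lamps : List[List[int]]) -> int:
--     # For each candidate endpoint, directly recount the lamps that are lit there
--     # (started minus already ended); keep the first point with the strictly best count.
--     points = sorted({q for pos, rad in lamps for q in (pos - rad, pos + rad)})
--     best = 0
--     res = 0
--     for p in points:
--         active = sum((pos - rad <= p) - (pos + rad < p) for pos, rad in lamps)
--         if active > best:
--             best = active
--             res = p
--     return res
-- ===== Notes on version B (the rewrite author's own statement) =====
-- stated objective: simpler
-- what changed: Replaces the two defaultdict counters and the running prefix-sum sweep by a direct recount: for each sorted candidate endpoint it counts started-minus-ended lamps on the spot, keeping only best/res state.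
import Mathlib
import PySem

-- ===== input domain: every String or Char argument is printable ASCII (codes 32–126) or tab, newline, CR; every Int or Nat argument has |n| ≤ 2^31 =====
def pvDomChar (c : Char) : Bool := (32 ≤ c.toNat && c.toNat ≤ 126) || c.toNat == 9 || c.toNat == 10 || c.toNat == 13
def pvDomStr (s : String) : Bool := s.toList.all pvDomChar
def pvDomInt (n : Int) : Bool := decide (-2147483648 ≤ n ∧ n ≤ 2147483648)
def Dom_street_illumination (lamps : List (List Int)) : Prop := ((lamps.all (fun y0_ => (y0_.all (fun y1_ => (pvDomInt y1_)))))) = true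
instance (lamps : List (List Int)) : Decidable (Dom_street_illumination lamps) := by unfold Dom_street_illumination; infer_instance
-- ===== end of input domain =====

-- B replaces A's two counter dicts + running prefix-sum sweep by a direct recount of
-- lit lamps at each sorted candidate point (simpler state; not faster).


-- ===== PORT A =====
def street_illumination (lamps : List (List Int)) : Int :=
  let st := lamps.foldl
    (fun (st : PySem.Dict Int Int × PySem.Dict Int Int × PySem.Set Int) l =>
      match l with
      | pos :: rad :: _ =>
          (st.1.modify (pos - rad) 0 (· + 1),
           st.2.1.modify (pos + rad) 0 (· + 1),
           (st.2.2.add (pos - rad)).add (pos + rad))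
      | _ => st)
    (PySem.Dict.empty, PySem.Dict.empty, PySem.Set.empty)
  let starts := st.1
  let ends := st.2.1
  let points := PySem.List.sorted (st.2.2 : List Int) (fun x => x) false
  let fin := points.foldl
    (fun (acc : Int × Int × Int) p =>
      let ill := acc.1 + starts.getD p 0
      let br := if ill > acc.2.1 then (ill, p) else (acc.2.1, acc.2.2)
      (ill - ends.getD p 0, br.1, br.2))
    (0, 0, 0)
  fin.2.2

-- ===== PORT B =====
def street_illumination_alt (lamps : List (List Int)) : Int :=
  let points := PySem.List.sorted
    (PySem.Set.ofList (lamps.flatMap (fun l =>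
      match l with
      | [] => []
      | [_] => []
      | pos :: rad :: _ => [pos - rad, pos + rad])) : List Int)
    (fun x => x) false
  let fin := points.foldl
    (fun (acc : Int × Int) p =>
      let active := lamps.foldl
        (fun (s : Int) l =>
          match l with
          | [] => s
          | [_] => s
          | pos :: rad :: _ =>
              s + (if pos - rad ≤ p then (1 : Int) else 0) - (if pos + rad < p then (1 : Int) else 0)) 0
      if active > acc.1 then (active, p) else acc)
    ((0 : Int), (0 : Int))
  fin.2

-- ===== PRECONDITION & SPEC =====
-- Pre_ excludes exactly the inputs where Python's 'for pos, rad in lamps' raises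
-- ValueError (an inner list whose length is not 2); both A and B raise there.
def Pre_street_illumination (lamps : List (List Int)) : Prop :=
  ∀ l ∈ lamps, l.length = 2
instance (lamps : List (List Int)) : Decidable (Pre_street_illumination lamps) := by
  unfold Pre_street_illumination; infer_instance
def pvWitness_street_illumination : List (List Int) := [[0, 2], [3, 1], [5, 0]]

def Spec_street_illumination (lamps : List (List Int)) (out : Int) : Prop := out = street_illumination_alt lamps
instance (lamps : List (List Int)) (out : Int) : Decidable (Spec_street_illumination lamps out) := by unfold Spec_street_illumination; infer_instance

-- ===== CLAIM (what is proved, stated in full; the proofs are below) =====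
def Claim_equal_street_illumination : Prop := ∀ (lamps : List (List Int)), Dom_street_illumination lamps → Pre_street_illumination lamps → Spec_street_illumination lamps (street_illumination lamps)

-- ===== LEMMAS AND PROOFS =====

-- start / end coordinates and the merged endpoint list of a lamp list (proof-only helpers)
def pvS (L : List (Int × Int)) : List Int := L.map (fun pr => pr.1 - pr.2)
def pvE (L : List (Int × Int)) : List Int := L.map (fun pr => pr.1 + pr.2)
def pvEvs (L : List (Int × Int)) : List Int := L.flatMap (fun pr => [pr.1 - pr.2, pr.1 + pr.2])
-- the number of lamps lit at point p: started minus ended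
def pvCnt (S E : List Int) (p : Int) : Int :=
  (S.countP (fun q => decide (q ≤ p)) : Int) - (E.countP (fun q => decide (q < p)) : Int)

theorem pvInner (L : List (Int × Int)) (p : Int) : ∀ (a : Int),
    L.foldl (fun (s : Int) pr =>
      s + (if pr.1 - pr.2 ≤ p then (1 : Int) else 0) - (if pr.1 + pr.2 < p then (1 : Int) else 0)) a
      = a + pvCnt (pvS L) (pvE L) p := by
  induction L with
  | nil => intro a; simp [pvCnt, pvS, pvE]
  | cons pr t ih =>
      intro a
      rw [List.foldl_cons, ih]
      simp only [pvCnt, pvS, pvE, List.map_cons, List.countP_cons, decide_eq_true_eq]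
      push_cast
      split_ifs <;> omega

theorem pvCountLe (S : List Int) (h : Int) :
    S.countP (fun q => decide (q ≤ h)) = S.countP (fun q => decide (q < h)) + S.count h := by
  induction S with
  | nil => simp
  | cons x t ih =>
      simp only [List.countP_cons, List.count_cons, ih, beq_iff_eq, decide_eq_true_eq]
      split_ifs <;> omega

theorem pvSetFold (L : List (Int × Int)) : ∀ (s0 : PySem.Set Int),
    L.foldl (fun (s : PySem.Set Int) pr => (s.add (pr.1 - pr.2)).add (pr.1 + pr.2)) s0
      = (pvEvs L).foldl PySem.Set.add s0 := by
  induction L with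
  | nil => intro s0; simp [pvEvs]
  | cons pr t ih =>
      intro s0
      rw [List.foldl_cons, ih]
      simp [pvEvs, List.flatMap_cons]

theorem pvTriple (L : List (Int × Int)) :
    ∀ (d1 d2 : PySem.Dict Int Int) (s0 : PySem.Set Int),
    L.foldl (fun (st : PySem.Dict Int Int × PySem.Dict Int Int × PySem.Set Int) pr =>
        (st.1.modify (pr.1 - pr.2) 0 (· + 1),
         st.2.1.modify (pr.1 + pr.2) 0 (· + 1),
         (st.2.2.add (pr.1 - pr.2)).add (pr.1 + pr.2))) (d1, d2, s0)
      = (L.foldl (fun d pr => d.modify (pr.1 - pr.2) 0 (· + 1)) d1,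
         L.foldl (fun d pr => d.modify (pr.1 + pr.2) 0 (· + 1)) d2,
         L.foldl (fun s pr => (s.add (pr.1 - pr.2)).add (pr.1 + pr.2)) s0) := by
  induction L with
  | nil => intros; rfl
  | cons pr t ih => intro d1 d2 s0; simp only [List.foldl_cons, ih]

theorem pvSweep (S E : List Int) : ∀ (rest : List Int) (ill : Int) (br : Int × Int),
    rest.Pairwise (· < ·) →
    (∀ q ∈ S, q ∈ rest ∨ ∀ p ∈ rest, q < p) →
    (∀ q ∈ E, q ∈ rest ∨ ∀ p ∈ rest, q < p) →
    (∀ h t, rest = h :: t →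
      ill = (S.countP (fun q => decide (q < h)) : Int) - (E.countP (fun q => decide (q < h)) : Int)) →
    (rest.foldl (fun (acc : Int × Int × Int) p =>
        let i1 := acc.1 + (S.count p : Int)
        let br2 := if i1 > acc.2.1 then (i1, p) else (acc.2.1, acc.2.2)
        (i1 - (E.count p : Int), br2.1, br2.2)) (ill, br)).2
      = rest.foldl (fun (acc : Int × Int) p =>
          if pvCnt S E p > acc.1 then (pvCnt S E p, p) else acc) br := by
  intro rest
  induction rest with
  | nil => intros; rfl
  | cons h t ih =>
      intro ill br hsort hcovS hcovE hill
      have hlt : ∀ p ∈ t, h < p := (List.pairwise_cons.mp hsort).1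
      have hillh := hill h t rfl
      have hi1 : ill + (S.count h : Int) = pvCnt S E h := by
        rw [hillh, pvCnt, pvCountLe S h]; push_cast; ring
      simp only [List.foldl_cons]
      rw [hi1]
      have hnext : ∀ h' t', t = h' :: t' →
          pvCnt S E h - (E.count h : Int)
            = (S.countP (fun q => decide (q < h')) : Int) - (E.countP (fun q => decide (q < h')) : Int) := by
        intro h' t' hteq
        have hhh' : h < h' := hlt h' (by rw [hteq]; simp)
        have hpt : (h' :: t').Pairwise (· < ·) := by
          have := (List.pairwise_cons.mp hsort).2; rwa [hteq] at this
        have hS : S.countP (fun q => decide (q < h')) = S.countP (fun q => decide (q ≤ h)) := by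
          apply List.countP_congr
          intro q hq
          simp only [decide_eq_true_eq]
          constructor
          · intro hqlt
            rcases hcovS q hq with hmem | hbelow
            · rcases List.mem_cons.mp hmem with rfl | hmem'
              · omega
              · rw [hteq] at hmem'
                rcases List.mem_cons.mp hmem' with rfl | hmem''
                · omega
                · have := (List.pairwise_cons.mp hpt).1 q hmem''
                  omega
            · have := hbelow h (by simp)
              omega
          · intro hqle; omega
        have hE : E.countP (fun q => decide (q < h')) = E.countP (fun q => decide (q ≤ h)) := by
          apply List.countP_congr
          intro q hq
          simp only [decide_eq_true_eq]
          constructor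
          · intro hqlt
            rcases hcovE q hq with hmem | hbelow
            · rcases List.mem_cons.mp hmem with rfl | hmem'
              · omega
              · rw [hteq] at hmem'
                rcases List.mem_cons.mp hmem' with rfl | hmem''
                · omega
                · have := (List.pairwise_cons.mp hpt).1 q hmem''
                  omega
            · have := hbelow h (by simp)
              omega
          · intro hqle; omega
        rw [hS, hE, pvCnt, pvCountLe S h, pvCountLe E h]
        push_cast; ring
      have := ih (pvCnt S E h - (E.count h : Int))
        (if pvCnt S E h > br.1 then (pvCnt S E h, h) else br)
        (List.pairwise_cons.mp hsort).2
        (by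
          intro q hq
          rcases hcovS q hq with hmem | hbelow
          · rcases List.mem_cons.mp hmem with rfl | hmem'
            · right; intro p hp; exact hlt p hp
            · left; exact hmem'
          · right; intro p hp; exact hbelow p (by simp [hp]))
        (by
          intro q hq
          rcases hcovE q hq with hmem | hbelow
          · rcases List.mem_cons.mp hmem with rfl | hmem'
            · right; intro p hp; exact hlt p hp
            · left; exact hmem'
          · right; intro p hp; exact hbelow p (by simp [hp]))
        (by intro h' t' hteq; exact hnext h' t' hteq)
      by_cases hb : pvCnt S E h > br.1
      · simpa [hb] using this
      · simpa [hb] using this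

theorem street_illumination_key : ∀ (L : List (Int × Int)),
    street_illumination (L.map (fun pr => [pr.1, pr.2]))
      = street_illumination_alt (L.map (fun pr => [pr.1, pr.2])) := by
  intro L
  unfold street_illumination street_illumination_alt
  simp only [List.foldl_map, List.flatMap_map]
  rw [pvTriple L]
  have hstart : ∀ p : Int,
      (L.foldl (fun d pr => d.modify (pr.1 - pr.2) 0 (· + 1)) PySem.Dict.empty).getD p 0
        = ((pvS L).count p : Int) := by
    intro p
    rw [pvS, ← List.foldl_map (f := fun pr : Int × Int => pr.1 - pr.2)
          (g := fun (d : PySem.Dict Int Int) x => d.modify x 0 (· + 1)),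
        PySem.Dict.getD_foldl_modify_add_one]
    simp
  have hend : ∀ p : Int,
      (L.foldl (fun d pr => d.modify (pr.1 + pr.2) 0 (· + 1)) PySem.Dict.empty).getD p 0
        = ((pvE L).count p : Int) := by
    intro p
    rw [pvE, ← List.foldl_map (f := fun pr : Int × Int => pr.1 + pr.2)
          (g := fun (d : PySem.Dict Int Int) x => d.modify x 0 (· + 1)),
        PySem.Dict.getD_foldl_modify_add_one]
    simp
  have hset : L.foldl (fun (s : PySem.Set Int) pr => (s.add (pr.1 - pr.2)).add (pr.1 + pr.2)) PySem.Set.empty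
      = PySem.Set.ofList (pvEvs L) := by
    rw [pvSetFold]
    rfl
  simp only [hstart, hend, hset, pvInner, zero_add]
  rw [show List.flatMap (fun a : Int × Int => [a.1 - a.2, a.1 + a.2]) L = pvEvs L from rfl]
  have hpair : (PySem.List.sorted (PySem.Set.ofList (pvEvs L)) (fun x => x)).Pairwise (· < ·) :=
    PySem.List.sorted_ofList_pairwise_lt (pvEvs L)
  have hmemS : ∀ q ∈ pvS L, q ∈ PySem.List.sorted (PySem.Set.ofList (pvEvs L)) (fun x => x) := by
    intro q hq
    rw [PySem.List.mem_sorted, PySem.Set.mem_ofList]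
    simp only [pvS, List.mem_map] at hq
    obtain ⟨pr, hpr, rfl⟩ := hq
    simp only [pvEvs, List.mem_flatMap]
    exact ⟨pr, hpr, by simp⟩
  have hmemE : ∀ q ∈ pvE L, q ∈ PySem.List.sorted (PySem.Set.ofList (pvEvs L)) (fun x => x) := by
    intro q hq
    rw [PySem.List.mem_sorted, PySem.Set.mem_ofList]
    simp only [pvE, List.mem_map] at hq
    obtain ⟨pr, hpr, rfl⟩ := hq
    simp only [pvEvs, List.mem_flatMap]
    exact ⟨pr, hpr, by simp⟩
  have h0 : ∀ h t, PySem.List.sorted (PySem.Set.ofList (pvEvs L)) (fun x => x) = h :: t →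
      (0 : Int) = ((pvS L).countP (fun q => decide (q < h)) : Int)
        - ((pvE L).countP (fun q => decide (q < h)) : Int) := by
    intro h t hpt
    rw [hpt] at hpair hmemS hmemE
    have hz : ∀ (X : List Int), (∀ q ∈ X, q ∈ h :: t) → X.countP (fun q => decide (q < h)) = 0 := by
      intro X hX
      apply List.countP_eq_zero.mpr
      intro q hq
      rcases List.mem_cons.mp (hX q hq) with rfl | hm
      · simp
      · have := (List.pairwise_cons.mp hpair).1 q hm
        simp only [decide_eq_true_eq]
        omega
    rw [hz (pvS L) hmemS, hz (pvE L) hmemE]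
    simp
  exact congrArg Prod.snd
    (pvSweep (pvS L) (pvE L) (PySem.List.sorted (PySem.Set.ofList (pvEvs L)) (fun x => x))
      0 (0, 0) hpair (fun q hq => Or.inl (hmemS q hq)) (fun q hq => Or.inl (hmemE q hq)) h0)

theorem street_illumination_shape (lamps : List (List Int))
    (h : Pre_street_illumination lamps) :
    lamps = (lamps.map (fun l => (l.headD 0, l.tail.headD 0))).map (fun pr => [pr.1, pr.2]) := by
  induction lamps with
  | nil => rfl
  | cons l t ih =>
      have hl := h l (by simp)
      match l, hl with
      | [a, b], _ =>
        have := ih (fun x hx => h x (by simp [hx]))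
        simp only [List.map_cons, List.map_map] at this ⊢
        exact congrArg (List.cons [a, b]) this

-- ===== VERDICT (by name: the statement is the Claim_ definition above) =====
theorem street_illumination_spec : Claim_equal_street_illumination := by
  intro lamps _ hpre
  unfold Spec_street_illumination
  rw [street_illumination_shape lamps hpre]
  exact street_illumination_key _
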